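-- pv_equiv track=rewrite | github.com/LinglingGreat/StudyAlgorithm | code/算术表达式去括号.py | remove2
-- ===== SOURCE A (Python) =====
-- def remove2(s):
--     if not s:
--         return s
--     stk = [1]  # assume there this a `()` outside the string
--     ret = []
--     sign = 1
--     for i in range(len(s)):
--         c = s[i]
--         if c == '+':
--             sign = 1
--         elif c == '-':
--             sign = -1
--         elif c == '(':
--             stk.append(sign * stk[-1])
--             sign = 1  # remember to reset the sign
--         elif c == ')':
--             stk.pop()
--         else:
--             if sign*stk[-1] == 1:
--                 ret.append("+")
--             elif sign*stk[-1] == -1: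
--                 ret.append("-")
--             ret.append(c)
--     return "".join(ret[1:])
-- ===== SOURCE B (Python) =====
-- # B: recursive descent instead of an explicit sign stack: walk(i, ctx, sign)
-- # consumes characters at one nesting level, recursing on '(' with the combined
-- # sign and returning at ')' with the resumption index and the running sign.
-- def remove2(s):
--     out = []
--     def walk(i, ctx, sign):
--         while i < len(s):
--             c = s[i]
--             if c == '+':
--                 sign = 1
--             elif c == '-':
--                 sign = -1
--             elif c == '(':
--                 i, sign = walk(i + 1, ctx * sign, 1)
--             elif c == ')':
--                 return i, sign
--             else:
--                 out.append('+' if sign * ctx == 1 else '-')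
--                 out.append(c)
--             i += 1
--         return i, sign
--     walk(0, 1, 1)
--     return ''.join(out)[1:]
-- ===== Notes on version B (the rewrite author's own statement) =====
-- stated objective: alternative
-- what changed: Replaced A's explicit stack of effective signs by a recursive-descent walk that consumes one nesting level at a time, recursing on '(' with the combined sign and returning the resumption index and running sign at ')'.
import Mathlib
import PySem

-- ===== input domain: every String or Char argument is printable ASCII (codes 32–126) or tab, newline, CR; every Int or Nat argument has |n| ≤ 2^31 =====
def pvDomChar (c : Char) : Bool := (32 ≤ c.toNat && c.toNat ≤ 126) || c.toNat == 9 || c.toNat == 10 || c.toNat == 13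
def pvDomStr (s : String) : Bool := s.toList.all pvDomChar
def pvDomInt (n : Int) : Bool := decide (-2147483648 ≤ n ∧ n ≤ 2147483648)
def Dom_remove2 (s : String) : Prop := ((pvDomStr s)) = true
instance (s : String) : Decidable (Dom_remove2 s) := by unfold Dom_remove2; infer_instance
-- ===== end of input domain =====

-- B replaces A's explicit sign stack by recursive descent over nesting levels (different decomposition, same cost); equivalence is about the return value.

-- ===== PORT A =====
-- one step of A's for-loop: state is (stk, ret, sign)
def stepA : (List Int × List Char × Int) → Char → (List Int × List Char × Int)
  | (stk, ret, sign), c =>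
    if c = '+' then (stk, ret, 1)
    else if c = '-' then (stk, ret, -1)
    else if c = '(' then (stk ++ [sign * stk.getLastD 1], ret, 1)
    else if c = ')' then (stk.dropLast, ret, sign)
    else
      (stk,
       (if sign * stk.getLastD 1 = 1 then ret ++ ['+']
        else if sign * stk.getLastD 1 = -1 then ret ++ ['-'] else ret) ++ [c],
       sign)

-- A: single pass over the characters with a stack of effective signs; returns "".join(ret[1:]).
-- (stk[-1]/pop on the empty stack raise in Python: excluded by Pre_; getLastD/dropLast are only
-- evaluated on a nonempty stack inside Pre_.)
def remove2 (s : String) : String :=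
  if s = "" then s
  else String.ofList (((s.toList.foldl stepA ([1], [], 1)).2.1).drop 1)

-- ===== PORT B =====
-- B's walk(i, ctx, sign): consumes one nesting level; returns (chars after the matching ')', sign, out).
-- fuel only makes the Python recursion total in Lean; it is never exhausted when fuel > length.
def walkB : Nat → Int → Int → List Char → List Char → List Char × Int × List Char
  | 0, _, sign, out, l => (l, sign, out)
  | fuel + 1, ctx, sign, out, l =>
    match l with
    | [] => ([], sign, out)
    | c :: rest =>
      if c = '+' then walkB fuel ctx 1 out rest
      else if c = '-' then walkB fuel ctx (-1) out rest
      else if c = '(' then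
        match walkB fuel (ctx * sign) 1 out rest with
        | (rest', sign', out') => walkB fuel ctx sign' out' rest'
      else if c = ')' then (rest, sign, out)
      else walkB fuel ctx sign (out ++ [if sign * ctx = 1 then '+' else '-', c]) rest

def remove2_alt (s : String) : String :=
  String.ofList (((walkB (s.toList.length + 1) 1 1 [] s.toList).2.2).drop 1)

-- ===== PRECONDITION & SPEC =====
-- running parenthesis balance of a prefix
def balC (c : Char) : Int := if c = '(' then 1 else if c = ')' then -1 else 0
def bal (l : List Char) : Int := (l.map balC).sum

-- Pre_ admits exactly the inputs on which A returns: once some prefix has a negative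
-- parenthesis balance, only bare sign characters may remain (any other character there
-- makes A's stk[-1]/pop raise IndexError on the emptied stack).
def Pre_remove2 (s : String) : Prop :=
  ∀ n ∈ List.range (s.toList.length + 1),
    bal (s.toList.take n) < 0 → ∀ c ∈ s.toList.drop n, c = '+' ∨ c = '-'
instance (s : String) : Decidable (Pre_remove2 s) := by unfold Pre_remove2; infer_instance

def pvWitness_remove2 : String := "1-(2+(3-4))"

def Spec_remove2 (s : String) (out : String) : Prop := out = remove2_alt s
instance (s : String) (out : String) : Decidable (Spec_remove2 s out) := by unfold Spec_remove2; infer_instance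

-- ===== CLAIM (what is proved, stated in full; the proofs are below) =====
def Claim_equal_remove2 : Prop := ∀ (s : String), Dom_remove2 s → Pre_remove2 s → Spec_remove2 s (remove2 s)
-- ===== LEMMAS AND PROOFS =====

lemma bal_append (a b : List Char) : bal (a ++ b) = bal a + bal b := by
  simp [bal]

-- the heart: walkB at one nesting level vs A's fold, related by the sign stack
lemma walk_main : ∀ (n : Nat) (l : List Char), l.length < n →
    ∀ (fuel : Nat) (ctx sign : Int) (out : List Char) (stk : List Int)
      (rest : List Char) (sg : Int) (o : List Char),
    l.length < fuel → (ctx = 1 ∨ ctx = -1) → (sign = 1 ∨ sign = -1) →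
    walkB fuel ctx sign out l = (rest, sg, o) →
    (sg = 1 ∨ sg = -1) ∧
    ((rest = [] ∧ ∃ stkE, List.foldl stepA (stk ++ [ctx], out, sign) l = (stkE, o, sg)) ∨
     (∃ l₁, l = l₁ ++ ')' :: rest ∧ bal l₁ = 0 ∧
        List.foldl stepA (stk ++ [ctx], out, sign) (l₁ ++ [')']) = (stk, o, sg))) := by
  intro n
  induction n with
  | zero => intro l h; omega
  | succ n ih =>
    intro l hl fuel ctx sign out stk rest sg o hfuel hctx hsign hw
    match fuel, hfuel with
    | fuel + 1, hfuel =>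
    match l, hl, hfuel with
    | [], _, _ =>
      simp [walkB] at hw
      obtain ⟨h1, h2, h3⟩ := hw
      subst h1; subst h2; subst h3
      exact ⟨hsign, Or.inl ⟨rfl, ⟨stk ++ [ctx], rfl⟩⟩⟩
    | c :: t, hl, hfuel =>
      have hln : t.length < n := by simpa using Nat.lt_of_succ_lt_succ hl
      have hlf : t.length < fuel := by simpa using Nat.lt_of_succ_lt_succ hfuel
      by_cases hp : c = '+'
      · subst hp
        simp [walkB] at hw
        obtain ⟨hsg, hd⟩ := ih t hln fuel ctx 1 out stk rest sg o hlf hctx (Or.inl rfl) hw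
        refine ⟨hsg, ?_⟩
        rcases hd with ⟨hrest, stkE, hfold⟩ | ⟨l₁, hsplit, hbal, hfold⟩
        · exact Or.inl ⟨hrest, stkE, by simpa [stepA] using hfold⟩
        · exact Or.inr ⟨'+' :: l₁, by simp [hsplit], by simpa [bal, balC] using hbal,
            by simpa [stepA] using hfold⟩
      · by_cases hm : c = '-'
        · subst hm
          simp [walkB] at hw
          obtain ⟨hsg, hd⟩ := ih t hln fuel ctx (-1) out stk rest sg o hlf hctx (Or.inr rfl) hw
          refine ⟨hsg, ?_⟩
          rcases hd with ⟨hrest, stkE, hfold⟩ | ⟨l₁, hsplit, hbal, hfold⟩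
          · exact Or.inl ⟨hrest, stkE, by simpa [stepA] using hfold⟩
          · exact Or.inr ⟨'-' :: l₁, by simp [hsplit], by simpa [bal, balC] using hbal,
              by simpa [stepA] using hfold⟩
        · by_cases ho : c = '('
          · subst ho
            rw [show walkB (fuel+1) ctx sign out ('(' :: t) =
                  (match walkB fuel (ctx * sign) 1 out t with
                   | (rest', sign', out') => walkB fuel ctx sign' out' rest') from by
                simp [walkB]] at hw
            rcases hW1 : walkB fuel (ctx * sign) 1 out t with ⟨rest', sg₁, o₁⟩
            rw [hW1] at hw
            have hcs : ctx * sign = 1 ∨ ctx * sign = -1 := by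
              rcases hctx with h | h <;> rcases hsign with h' | h' <;> simp [h, h']
            obtain ⟨hsg₁, hd₁⟩ := ih t hln fuel (ctx * sign) 1 out (stk ++ [ctx]) rest' sg₁ o₁ hlf hcs (Or.inl rfl) hW1
            have hpush : stepA (stk ++ [ctx], out, sign) '(' = ((stk ++ [ctx]) ++ [ctx * sign], out, 1) := by
              simp [stepA, mul_comm]
            rcases hd₁ with ⟨hrest', stkE, hfold₁⟩ | ⟨r₁, hsplit₁, hbal₁, hfold₁⟩
            · -- inner level ran to the end of the string
              subst hrest'
              match fuel, hlf with
              | fuel + 1, _ =>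
                simp [walkB] at hw
                obtain ⟨h1, h2, h3⟩ := hw
                subst h1; subst h2; subst h3
                refine ⟨hsg₁, Or.inl ⟨rfl, stkE, ?_⟩⟩
                simp only [List.foldl_cons, hpush]
                exact hfold₁
            · -- inner level returned at its ')'
              subst hsplit₁
              have hr'len : rest'.length < n := by simp at hln; omega
              have hr'fuel : rest'.length < fuel := by simp at hlf; omega
              obtain ⟨hsg₂, hd₂⟩ := ih rest' hr'len fuel ctx sg₁ o₁ stk rest sg o hr'fuel hctx hsg₁ hw
              refine ⟨hsg₂, ?_⟩
              have hmid : List.foldl stepA (stk ++ [ctx], out, sign) ('(' :: (r₁ ++ [')'])) = (stk ++ [ctx], o₁, sg₁) := by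
                simp only [List.foldl_cons, hpush, List.foldl_append]
                simpa [List.foldl_append] using hfold₁
              rcases hd₂ with ⟨hrest, stkE, hfold₂⟩ | ⟨l₂, hsplit₂, hbal₂, hfold₂⟩
              · refine Or.inl ⟨hrest, stkE, ?_⟩
                have heq : ('(' :: (r₁ ++ ')' :: rest')) = ('(' :: (r₁ ++ [')'])) ++ rest' := by simp
                rw [heq, List.foldl_append, hmid]
                exact hfold₂
              · refine Or.inr ⟨'(' :: r₁ ++ [')'] ++ l₂, by simp [hsplit₂], ?_, ?_⟩
                · simp [bal, balC] at hbal₁ hbal₂ ⊢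
                  omega
                · have heq : ('(' :: r₁ ++ [')'] ++ l₂) ++ [')'] = ('(' :: (r₁ ++ [')'])) ++ (l₂ ++ [')']) := by simp
                  rw [heq, List.foldl_append, hmid]
                  exact hfold₂
          · by_cases hc : c = ')'
            · subst hc
              simp [walkB] at hw
              obtain ⟨h1, h2, h3⟩ := hw
              subst h1; subst h2; subst h3
              refine ⟨hsign, Or.inr ⟨[], by simp, by simp [bal], ?_⟩⟩
              simp [stepA]
            · -- operand character
              simp [walkB, hp, hm, ho, hc] at hw
              obtain ⟨hsg, hd⟩ := ih t hln fuel ctx sign (out ++ [if sign * ctx = 1 then '+' else '-', c]) stk rest sg o hlf hctx hsign hw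
              have hstep : stepA (stk ++ [ctx], out, sign) c =
                  (stk ++ [ctx], out ++ [if sign * ctx = 1 then '+' else '-', c], sign) := by
                rcases hctx with h | h <;> rcases hsign with h' | h' <;>
                  simp [stepA, hp, hm, ho, hc, h, h']
              refine ⟨hsg, ?_⟩
              rcases hd with ⟨hrest, stkE, hfold⟩ | ⟨l₁, hsplit, hbal, hfold⟩
              · exact Or.inl ⟨hrest, stkE, by simpa [hstep] using hfold⟩
              · exact Or.inr ⟨c :: l₁, by simp [hsplit], by simpa [bal, balC, hp, hm, ho, hc] using hbal,
                  by simp only [List.cons_append, List.foldl_cons, hstep]; exact hfold⟩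

lemma foldl_signs : ∀ (l : List Char) (stk : List Int) (ret : List Char) (sign : Int),
    (∀ c ∈ l, c = '+' ∨ c = '-') →
    ∃ sg, List.foldl stepA (stk, ret, sign) l = (stk, ret, sg) := by
  intro l
  induction l with
  | nil => intro stk ret sign _; exact ⟨sign, rfl⟩
  | cons c t ih =>
    intro stk ret sign h
    rcases h c (by simp) with hc | hc <;> subst hc <;>
      simpa [stepA] using ih stk ret _ (fun c hc => h c (by simp [hc]))

lemma take_drop_split (l₁ rest : List Char) :
    (l₁ ++ ')' :: rest).take (l₁.length + 1) = l₁ ++ [')'] ∧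
    (l₁ ++ ')' :: rest).drop (l₁.length + 1) = rest := by
  have h : l₁ ++ ')' :: rest = (l₁ ++ [')']) ++ rest := by simp
  have hlen : (l₁ ++ [')']).length = l₁.length + 1 := by simp
  constructor
  · rw [h, ← hlen, List.take_left]
  · rw [h, ← hlen, List.drop_left]

-- ===== VERDICT (by name: the statement is the Claim_ definition above) =====
theorem remove2_spec : Claim_equal_remove2 := by
  intro s _ hpre
  unfold Spec_remove2
  by_cases hs : s = ""
  · subst hs; decide
  · rcases hW : walkB (s.toList.length + 1) 1 1 [] s.toList with ⟨rest, sg, o⟩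
    obtain ⟨hsg, hd⟩ := walk_main (s.toList.length + 1) s.toList (by omega)
      (s.toList.length + 1) 1 1 [] [] rest sg o (by omega) (Or.inl rfl) (Or.inl rfl) hW
    have halt : remove2_alt s = String.ofList (o.drop 1) := by
      unfold remove2_alt; rw [hW]
    rcases hd with ⟨_, stkE, hfold⟩ | ⟨l₁, hsplit, hbal, hfold⟩
    · unfold remove2
      rw [if_neg hs]
      have : List.foldl stepA ([1], [], 1) s.toList = (stkE, o, sg) := by
        simpa using hfold
      rw [this, halt]
    · -- A over-pops at the ')' ending l₁; Pre_ forces the rest to be bare signs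
      obtain ⟨htake, hdrop⟩ := take_drop_split l₁ rest
      rw [← hsplit] at htake hdrop
      have hmem : l₁.length + 1 ∈ List.range (s.toList.length + 1) := by
        simp only [List.mem_range]
        have := congrArg List.length hsplit
        simp only [List.length_append, List.length_cons] at this
        omega
      have hneg : bal (s.toList.take (l₁.length + 1)) < 0 := by
        have h1 : bal [')'] = -1 := by simp [bal, balC]
        rw [htake, bal_append, hbal, h1]
        decide
      have hchars : ∀ c ∈ rest, c = '+' ∨ c = '-' := by
        intro c hc
        exact hpre (l₁.length + 1) hmem hneg c (by rw [hdrop]; exact hc)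
      obtain ⟨sg', hsgn⟩ := foldl_signs rest [] o sg hchars
      unfold remove2
      rw [if_neg hs]
      have hsplit' : s.toList = (l₁ ++ [')']) ++ rest := by simp [hsplit]
      rw [hsplit', List.foldl_append]
      have hfold' : List.foldl stepA ([1], [], 1) (l₁ ++ [')']) = ([], o, sg) := by
        simpa using hfold
      rw [hfold', hsgn, halt]
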